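-- pv_equiv track=rewrite | github.com/jisooooooooooooooooooooo/kbeauty-marketing | phase1_newsletter/tiktok_trends.py | _get_relevance_score
-- ===== SOURCE A (Python) =====
-- PRODUCT_RELATED_KEYWORDS = {
--     "high": ["ampoule", "pore", "serum", "essence", "kbeautyserum", "serumtok", "poreminimizer", "poreshrinking", "skinessence"],
--     "medium": ["kbeauty", "koreanskincare", "glasskin", "skintok"],
--     "low": ["skincareroutine", "grwm"],
-- }
--
-- def _get_relevance_score(hashtag: str) -> int:
--     """해시태그의 제품 관련도 점수 반환 (1-10)"""
--     tag_lower = hashtag.lower().lstrip("#")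
--     for tag in PRODUCT_RELATED_KEYWORDS["high"]:
--         if tag in tag_lower or tag_lower in tag:
--             return 9
--     for tag in PRODUCT_RELATED_KEYWORDS["medium"]:
--         if tag in tag_lower or tag_lower in tag:
--             return 6
--     for tag in PRODUCT_RELATED_KEYWORDS["low"]:
--         if tag in tag_lower or tag_lower in tag:
--             return 3
--     return 5
-- ===== SOURCE B (Python) =====
-- PRODUCT_RELATED_KEYWORDS = {
--     "high": ["ampoule", "pore", "serum", "essence", "kbeautyserum", "serumtok", "poreminimizer", "poreshrinking", "skinessence"],
--     "medium": ["kbeauty", "koreanskincare", "glasskin", "skintok"],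
--     "low": ["skincareroutine", "grwm"],
-- }
--
-- _TIER_SCORES = {"high": 9, "medium": 6, "low": 3}
--
-- def _get_relevance_score(hashtag: str) -> int:
--     """해시태그의 제품 관련도 점수 반환 (1-10)"""
--     tag_lower = hashtag.lower().lstrip("#")
--     scores = [score
--               for tier, score in _TIER_SCORES.items()
--               for kw in PRODUCT_RELATED_KEYWORDS[tier]
--               if kw in tag_lower or tag_lower in kw]
--     return max(scores, default=5)
-- ===== Notes on version B (the rewrite author's own statement) =====
-- stated objective: alternative
-- what changed: Replaces A's three short-circuit priority loops by a single collect-all-matching-tier-scores pass over a tier-score table followed by max(scores, default=5).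
import Mathlib
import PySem

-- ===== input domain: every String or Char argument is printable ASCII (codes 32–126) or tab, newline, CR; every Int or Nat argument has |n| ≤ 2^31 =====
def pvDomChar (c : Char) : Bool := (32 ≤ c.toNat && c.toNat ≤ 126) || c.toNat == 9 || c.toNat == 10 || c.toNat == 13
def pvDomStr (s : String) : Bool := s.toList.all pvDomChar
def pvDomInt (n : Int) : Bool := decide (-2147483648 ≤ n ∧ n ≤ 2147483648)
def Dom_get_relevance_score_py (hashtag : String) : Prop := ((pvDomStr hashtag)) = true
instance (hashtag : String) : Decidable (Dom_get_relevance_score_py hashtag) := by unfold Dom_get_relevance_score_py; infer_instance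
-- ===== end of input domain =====

-- B replaces A's three short-circuit priority loops by one collect-all-matching-tier-scores
-- pass followed by max(scores, default=5); alternative decomposition, same cost.

-- ===== PORT A =====
-- module constant PRODUCT_RELATED_KEYWORDS; the dict is only indexed with the literal
-- keys "high"/"medium"/"low", ported as three named lists.
def pvKwHigh : List String :=
  ["ampoule", "pore", "serum", "essence", "kbeautyserum", "serumtok", "poreminimizer", "poreshrinking", "skinessence"]
def pvKwMedium : List String := ["kbeauty", "koreanskincare", "glasskin", "skintok"]
def pvKwLow : List String := ["skincareroutine", "grwm"]

-- hashtag.lower().lstrip("#"): hand port of str.lstrip("#") — exact: drops the leading '#' characters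
def pvTagLower (hashtag : String) : String :=
  String.ofList ((PySem.Str.lower hashtag).toList.dropWhile (fun c => c == '#'))

def get_relevance_score_py (hashtag : String) : Int :=
  let tagLower := pvTagLower hashtag
  -- each 'for tag in …: if tag in tag_lower or tag_lower in tag: return k' loop
  if pvKwHigh.any (fun tag => PySem.Str.isIn tag tagLower || PySem.Str.isIn tagLower tag) then 9
  else if pvKwMedium.any (fun tag => PySem.Str.isIn tag tagLower || PySem.Str.isIn tagLower tag) then 6
  else if pvKwLow.any (fun tag => PySem.Str.isIn tag tagLower || PySem.Str.isIn tagLower tag) then 3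
  else 5

-- ===== PORT B =====
-- _TIER_SCORES.items() paired with the dict lookup PRODUCT_RELATED_KEYWORDS[tier]
def pvTierTable : List (List String × Int) := [(pvKwHigh, 9), (pvKwMedium, 6), (pvKwLow, 3)]

def get_relevance_score_py_alt (hashtag : String) : Int :=
  let tagLower := pvTagLower hashtag
  -- the list comprehension: for each tier, keep the score once per matching keyword
  let scores := pvTierTable.flatMap (fun ts =>
    (ts.1.filter (fun kw => PySem.Str.isIn kw tagLower || PySem.Str.isIn tagLower kw)).map
      (fun _ => ts.2))
  PySem.List.maxD scores (fun x => x) 5   -- max(scores, default=5)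

-- ===== PRECONDITION & SPEC =====
def Spec_get_relevance_score_py (hashtag : String) (out : Int) : Prop := out = get_relevance_score_py_alt hashtag
instance (hashtag : String) (out : Int) : Decidable (Spec_get_relevance_score_py hashtag out) := by unfold Spec_get_relevance_score_py; infer_instance

-- ===== CLAIM (what is proved, stated in full; the proofs are below) =====
def Claim_equal_get_relevance_score_py : Prop := ∀ (hashtag : String), Dom_get_relevance_score_py hashtag → Spec_get_relevance_score_py hashtag (get_relevance_score_py hashtag)

-- ===== LEMMAS AND PROOFS =====

theorem pv_maxD_eq_of_mem_of_le (xs : List Int) (m d : Int) (hmem : m ∈ xs)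
    (hle : ∀ y ∈ xs, y ≤ m) : PySem.List.maxD xs (fun x => x) d = m := by
  unfold PySem.List.maxD
  cases hx : PySem.List.max? xs (fun x => x) with
  | none =>
      rw [PySem.List.max?_eq_none_iff] at hx
      simp [hx] at hmem
  | some k =>
      have h1 := PySem.List.max?_isMax hx m hmem
      have h2 := hle k (PySem.List.max?_mem hx)
      simp only [Option.getD_some]
      omega

theorem pv_blocks (p : String → Bool) (a b c : List String) :
    PySem.List.maxD
      (([(a, (9:Int)), (b, 6), (c, 3)] : List (List String × Int)).flatMap (fun ts =>
        (ts.1.filter p).map (fun _ => ts.2))) (fun x => x) 5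
    = if a.any p then 9 else if b.any p then 6 else if c.any p then 3 else 5 := by
  simp only [List.flatMap_cons, List.flatMap_nil, List.append_nil]
  by_cases ha : a.any p = true
  · obtain ⟨x, hx, hpx⟩ := List.any_eq_true.mp ha
    rw [if_pos ha]
    apply pv_maxD_eq_of_mem_of_le
    · exact List.mem_append.mpr (Or.inl
        (List.mem_map.mpr ⟨x, List.mem_filter.mpr ⟨hx, hpx⟩, rfl⟩))
    · intro y hy
      rcases List.mem_append.mp hy with h | h
      · obtain ⟨_, _, rfl⟩ := List.mem_map.mp h; exact le_refl _
      rcases List.mem_append.mp h with h | h <;>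
        · obtain ⟨_, _, rfl⟩ := List.mem_map.mp h; omega
  · have ha' : a.filter p = [] := by
      simp only [List.filter_eq_nil_iff]
      intro x hx hpx
      exact ha (List.any_eq_true.mpr ⟨x, hx, hpx⟩)
    rw [if_neg ha, ha']
    simp only [List.map_nil, List.nil_append]
    by_cases hb : b.any p = true
    · obtain ⟨x, hx, hpx⟩ := List.any_eq_true.mp hb
      rw [if_pos hb]
      apply pv_maxD_eq_of_mem_of_le
      · exact List.mem_append.mpr (Or.inl
          (List.mem_map.mpr ⟨x, List.mem_filter.mpr ⟨hx, hpx⟩, rfl⟩))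
      · intro y hy
        rcases List.mem_append.mp hy with h | h <;>
          · obtain ⟨_, _, rfl⟩ := List.mem_map.mp h; omega
    · have hb' : b.filter p = [] := by
        simp only [List.filter_eq_nil_iff]
        intro x hx hpx
        exact hb (List.any_eq_true.mpr ⟨x, hx, hpx⟩)
      rw [if_neg hb, hb']
      simp only [List.map_nil, List.nil_append]
      by_cases hc : c.any p = true
      · obtain ⟨x, hx, hpx⟩ := List.any_eq_true.mp hc
        rw [if_pos hc]
        apply pv_maxD_eq_of_mem_of_le
        · exact List.mem_map.mpr ⟨x, List.mem_filter.mpr ⟨hx, hpx⟩, rfl⟩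
        · intro y hy
          obtain ⟨_, _, rfl⟩ := List.mem_map.mp hy; exact le_refl _
      · have hc' : c.filter p = [] := by
          simp only [List.filter_eq_nil_iff]
          intro x hx hpx
          exact hc (List.any_eq_true.mpr ⟨x, hx, hpx⟩)
        rw [if_neg hc, hc']
        simp only [List.map_nil]
        rfl

-- ===== VERDICT (by name: the statement is the Claim_ definition above) =====
theorem get_relevance_score_py_spec : Claim_equal_get_relevance_score_py := by
  intro hashtag _
  unfold Spec_get_relevance_score_py get_relevance_score_py get_relevance_score_py_alt pvTierTable
  exact (pv_blocks (fun kw => PySem.Str.isIn kw (pvTagLower hashtag) || PySem.Str.isIn (pvTagLower hashtag) kw) pvKwHigh pvKwMedium pvKwLow).symm
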